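-- pv_equiv track=rewrite | github.com/balker0322/advent_of_code | 2023_day_07/part1.py | score_type
-- ===== SOURCE A (Python) =====
-- def score_type(_card):
--
--     card = str(_card[0])
--
--     score = 0
--     while card:
--         c = card[0]
--         old_count = len(card)
--         card = card.replace(c, '')
--         new_count = len(card)
--         score += pow(3, old_count-new_count)
--
--
--     return score
-- ===== SOURCE B (Python) =====
-- def score_type(_card):
--     card = str(_card[0])
--     counts = {}
--     for c in card:
--         counts[c] = counts.get(c, 0) + 1
--     return sum(3 ** n for n in counts.values())
-- ===== Notes on version B (the rewrite author's own statement) =====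
-- stated objective: idiomatic
-- what changed: Replaces the while-loop that repeatedly rescans and strips the string with a single frequency-counting pass over the characters followed by a sum of 3^count over the counts.
-- outside the precondition, e.g. on score_type([]): A raises IndexError, B raises IndexError
import Mathlib
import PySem

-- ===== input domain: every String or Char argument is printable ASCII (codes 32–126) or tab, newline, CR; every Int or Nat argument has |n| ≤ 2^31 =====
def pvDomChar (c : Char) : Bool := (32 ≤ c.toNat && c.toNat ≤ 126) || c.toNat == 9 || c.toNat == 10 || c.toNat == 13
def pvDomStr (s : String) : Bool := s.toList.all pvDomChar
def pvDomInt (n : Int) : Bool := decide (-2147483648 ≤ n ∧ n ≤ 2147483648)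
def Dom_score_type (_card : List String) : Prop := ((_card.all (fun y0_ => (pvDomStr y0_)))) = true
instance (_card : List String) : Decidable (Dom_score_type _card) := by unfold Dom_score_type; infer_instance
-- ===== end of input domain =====

-- B replaces A's while/replace rescanning loop by one counting pass and a sum of 3^count (idiomatic, not claimed faster).

-- ===== PORT A =====
-- the while loop: take the first char c, strip every occurrence (card.replace(c, '')
-- on a 1-char pattern removes all occurrences, i.e. keeps the chars ≠ c), add 3^(removed)
def scoreLoopA : List Char → Int
  | [] => 0
  | c :: rest =>
      let card' := (c :: rest).filter (fun x => x ≠ c)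
      (3 : Int) ^ ((c :: rest).length - card'.length) + scoreLoopA card'
termination_by l => l.length
decreasing_by
  show (List.filter (fun x => decide (x ≠ c)) (c :: rest)).length < (c :: rest).length
  rw [List.filter_cons]
  simp only [decide_not, ne_eq, decide_true, Bool.not_true, Bool.false_eq_true, if_false,
    List.length_cons]
  exact Nat.lt_succ_of_le (List.length_filter_le _ rest)

def score_type (_card : List String) : Int :=
  match PySem.List.pyGet? _card 0 with
  | none => 0                      -- IndexError in Python; excluded by Pre_score_type
  | some card => scoreLoopA card.toList

-- ===== PORT B =====
def score_type_alt (_card : List String) : Int :=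
  match PySem.List.pyGet? _card 0 with
  | none => 0                      -- IndexError in Python; excluded by Pre_score_type
  | some card =>
      -- counts[c] = counts.get(c, 0) + 1 in one pass
      let counts := card.toList.foldl (fun d c => d.insert c (d.getD c (0:Int) + 1)) PySem.Dict.empty
      -- sum(3 ** n for n in counts.values()); counts are positive, so 3 ** n = 3 ^ n.toNat
      (counts.values.map (fun n => (3 : Int) ^ n.toNat)).sum

-- ===== PRECONDITION & SPEC =====
-- Pre_ excludes only the empty list, on which both A and B raise IndexError at _card[0].
def Pre_score_type (_card : List String) : Prop := _card ≠ []
instance (_card : List String) : Decidable (Pre_score_type _card) := by unfold Pre_score_type; infer_instance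
def pvWitness_score_type : List String := ["AKQJT"]

def Spec_score_type (_card : List String) (out : Int) : Prop := out = score_type_alt _card
instance (_card : List String) (out : Int) : Decidable (Spec_score_type _card out) := by unfold Spec_score_type; infer_instance

-- ===== CLAIM (what is proved, stated in full; the proofs are below) =====
def Claim_equal_score_type : Prop := ∀ (_card : List String), Dom_score_type _card → Pre_score_type _card → Spec_score_type _card (score_type _card)

-- ===== LEMMAS AND PROOFS =====

-- A's loop computes the Finset sum of 3^multiplicity over the distinct characters
theorem scoreLoopA_eq_finset_sum (cs : List Char) :
    scoreLoopA cs = ∑ c ∈ cs.toFinset, (3 : Int) ^ (cs.count c) := by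
  induction cs using scoreLoopA.induct with
  | case1 => simp [scoreLoopA]
  | case2 c rest card' ih =>
    rw [scoreLoopA]
    rw [show ((c :: rest).filter (fun x => x ≠ c)) = card' from rfl] at *
    have hcard' : card' = rest.filter (fun x => x ≠ c) := by
      simp [card']
    -- exponent = count of c in (c :: rest)
    have hlen : (c :: rest).length - card'.length = (c :: rest).count c := by
      have h1 := List.length_eq_length_filter_add (l := rest) (fun x => decide (x ≠ c))
      have h2 : (rest.filter (fun x => !decide (x ≠ c))).length = rest.count c := by
        rw [List.count, List.countP_eq_length_filter]
        congr 1
        apply List.filter_congr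
        intro x _; by_cases h : x = c <;> simp [h]
      simp only [hcard', List.count_cons_self, List.length_cons]
      omega
    -- counts of other chars survive the filter
    have hcount : ∀ d ∈ card'.toFinset, card'.count d = (c :: rest).count d := by
      intro d hd
      have hdne : d ≠ c := by
        have : d ∈ card' := List.mem_toFinset.mp hd
        rw [hcard'] at this
        simpa using (List.of_mem_filter this)
      rw [hcard', List.count_filter (by simp [hdne])]
      simp [Ne.symm hdne]
    have hfs : card'.toFinset = (c :: rest).toFinset.erase c := by
      ext d
      simp only [hcard', List.mem_toFinset, Finset.mem_erase, List.mem_filter, List.mem_cons,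
        decide_eq_true_eq, ne_eq]
      tauto
    rw [hlen, ih, Finset.sum_congr rfl (fun d hd => by rw [hcount d hd]), hfs]
    exact Finset.add_sum_erase _ (fun d => (3 : Int) ^ List.count d (c :: rest)) (by simp)

-- B's counter values are the multiplicities over the distinct characters
theorem altSum_eq_finset_sum (cs : List Char) :
    ((((cs.foldl (fun d c => d.insert c (d.getD c (0:Int) + 1)) PySem.Dict.empty)).values.map
        (fun n => (3 : Int) ^ n.toNat)).sum)
      = ∑ c ∈ cs.toFinset, (3 : Int) ^ (cs.count c) := by
  rw [PySem.Dict.foldl_insert_getD_add_one_eq_counter]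
  have hv : (PySem.Dict.counter cs).values
      = (PySem.Set.ofList cs).map (fun k => (cs.count k : Int)) := by
    simp [PySem.Dict.values, PySem.Dict.items_counter, List.map_map, Function.comp]
  rw [hv, List.map_map]
  have : ((fun n : Int => (3 : Int) ^ n.toNat) ∘ fun k => (cs.count k : Int))
      = fun k => (3 : Int) ^ (cs.count k) := by
    funext k; simp
  rw [this]
  have hfin : (PySem.Set.ofList cs).toFinset = cs.toFinset := by
    ext d; simp [List.mem_toFinset, PySem.Set.mem_ofList]
  rw [← List.sum_toFinset _ (PySem.Set.nodup_ofList cs), hfin]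

-- ===== VERDICT (by name: the statement is the Claim_ definition above) =====
theorem score_type_spec : Claim_equal_score_type := by
  intro _card _ hpre
  unfold Spec_score_type score_type score_type_alt
  match _card, hpre with
  | s :: rest, _ =>
    simp only [PySem.List.pyGet?, PySem.List.pyIdx?]
    norm_num
    rw [scoreLoopA_eq_finset_sum, altSum_eq_finset_sum]
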